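-- pv_equiv track=rewrite | github.com/Jang-Jaewon/Algorithm-Study | 04_greedy/003_창고정리.py | solution
-- ===== SOURCE A (Python) =====
-- def solution(L, M, boxs):
--   boxs = sorted(boxs)
--   for _ in range(M):
--     boxs[L-1] -= 1
--     boxs[0] += 1
--     boxs = sorted(boxs)
--   res = boxs[-1] - boxs[0]
--   return res
-- ===== SOURCE B (Python) =====
-- def _insert_sorted(xs, v):
--     lo, hi = 0, len(xs)
--     while lo < hi:
--         mid = (lo + hi) // 2
--         if xs[mid] <= v:
--             lo = mid + 1
--         else:
--             hi = mid
--     xs.insert(lo, v)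
--     return xs
--
-- def solution(L, M, boxs):
--     n = len(boxs)
--     xs = sorted(boxs)
--     p = L - 1 if L - 1 >= 0 else n + (L - 1)
--     if p == 0:
--         return xs[-1] - xs[0]
--     for _ in range(M):
--         v = xs[p]
--         core = xs[1:p] + xs[p + 1:]
--         xs = _insert_sorted(_insert_sorted(core, v - 1), xs[0] + 1)
--     return xs[-1] - xs[0]
-- ===== Notes on version B (the rewrite author's own statement) =====
-- stated objective: alternative
-- what changed: Instead of re-sorting the whole list after every move, B resolves the Python index L-1 to a sorted position p once, returns the spread immediately when p = 0 (each move then touches the same slot and is a no-op), and otherwise keeps the list sorted by re-inserting only the two changed values via binary search into the list minus positions 0 and p each step.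
import Mathlib
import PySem

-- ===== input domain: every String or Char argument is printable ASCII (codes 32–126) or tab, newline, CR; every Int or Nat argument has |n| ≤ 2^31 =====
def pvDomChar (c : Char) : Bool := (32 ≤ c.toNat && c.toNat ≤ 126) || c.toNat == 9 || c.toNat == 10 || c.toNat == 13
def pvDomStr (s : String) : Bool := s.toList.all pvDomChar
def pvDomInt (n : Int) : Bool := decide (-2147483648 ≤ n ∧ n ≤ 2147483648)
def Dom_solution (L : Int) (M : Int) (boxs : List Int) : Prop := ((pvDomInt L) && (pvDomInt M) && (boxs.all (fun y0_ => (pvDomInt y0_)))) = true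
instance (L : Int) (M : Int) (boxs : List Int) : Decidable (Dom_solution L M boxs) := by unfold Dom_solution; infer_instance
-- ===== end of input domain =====

-- B resolves the Python index L-1 to a sorted position p once, returns the spread immediately when p = 0
-- (each move then hits the same slot and is a no-op), and otherwise keeps the list sorted, re-inserting
-- only the two changed values by binary search each step instead of re-sorting the whole list every move.

-- ===== PORT A =====
-- boxs[i] += d (Python indexing; an out-of-range i is an IndexError in Python, excluded by Pre_;
-- the total forms pyGetD/pySetD are used only under Pre_'s in-range guarantee)
def pyAddAt (bs : List Int) (i : Int) (d : Int) : List Int :=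
  PySem.List.pySetD bs i (PySem.List.pyGetD bs i 0 + d)

def solution (L : Int) (M : Int) (boxs : List Int) : Int :=
  let b0 := PySem.List.sorted boxs (fun x => x) false
  let bf := (PySem.List.pyRange 0 M 1).foldl
    (fun bs _ => PySem.List.sorted (pyAddAt (pyAddAt bs (L - 1) (-1)) 0 1) (fun x => x) false) b0
  PySem.List.pyGetD bf (-1) 0 - PySem.List.pyGetD bf 0 0

-- ===== PORT B =====
-- the `while lo < hi` binary-search loop of Source B's _insert_sorted (fdiv is Python's //)
def bisLoop (xs : List Int) (v : Int) (lo hi : Int) : Int :=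
  if _h : lo < hi then
    if PySem.List.pyGetD xs (PySem.Int.floordiv (lo + hi) 2) 0 ≤ v then
      bisLoop xs v (PySem.Int.floordiv (lo + hi) 2 + 1) hi
    else
      bisLoop xs v lo (PySem.Int.floordiv (lo + hi) 2)
  else lo
termination_by (hi - lo).toNat
decreasing_by
  all_goals
    have hm : PySem.Int.floordiv (lo + hi) 2 = (lo + hi) / 2 := by
      simp [PySem.Int.floordiv, Int.fdiv_eq_ediv]
    rw [hm]
    omega

-- Source B's _insert_sorted: binary search, then list.insert
def insertSorted (xs : List Int) (v : Int) : List Int :=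
  PySem.List.insert xs (bisLoop xs v 0 xs.length) v

def solution_alt (L : Int) (M : Int) (boxs : List Int) : Int :=
  let n : Int := boxs.length
  let xs := PySem.List.sorted boxs (fun x => x) false
  let p : Int := if L - 1 ≥ 0 then L - 1 else n + (L - 1)
  if p = 0 then
    PySem.List.pyGetD xs (-1) 0 - PySem.List.pyGetD xs 0 0
  else
    let xf := (PySem.List.pyRange 0 M 1).foldl
      (fun xs _ =>
        let v := PySem.List.pyGetD xs p 0
        let core := PySem.List.slice xs (some 1) (some p) ++ PySem.List.slice xs (some (p + 1)) none
        insertSorted (insertSorted core (v - 1)) (PySem.List.pyGetD xs 0 0 + 1)) xs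
    PySem.List.pyGetD xf (-1) 0 - PySem.List.pyGetD xf 0 0

-- ===== PRECONDITION & SPEC =====
-- Pre_ is exactly A's domain: boxs must be nonempty, and (unless M ≤ 0, in which case the loop body
-- never runs) L-1 must be a valid Python index into it (−len ≤ L−1 < len); everywhere else A raises
-- IndexError.
def Pre_solution (L : Int) (M : Int) (boxs : List Int) : Prop :=
  boxs ≠ [] ∧ (M ≤ 0 ∨ (-(boxs.length : Int) ≤ L - 1 ∧ L - 1 < (boxs.length : Int)))

instance (L : Int) (M : Int) (boxs : List Int) : Decidable (Pre_solution L M boxs) := by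
  unfold Pre_solution; infer_instance

def pvWitness_solution : Int × Int × List Int := (3, 4, [5, 1, 2])

def Spec_solution (L : Int) (M : Int) (boxs : List Int) (out : Int) : Prop := out = solution_alt L M boxs
instance (L : Int) (M : Int) (boxs : List Int) (out : Int) : Decidable (Spec_solution L M boxs out) := by unfold Spec_solution; infer_instance

-- ===== CLAIM (what is proved, stated in full; the proofs are below) =====
def Claim_equal_solution : Prop := ∀ (L : Int) (M : Int) (boxs : List Int), Dom_solution L M boxs → Pre_solution L M boxs → Spec_solution L M boxs (solution L M boxs)

-- ===== LEMMAS AND PROOFS =====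

-- linear sorted insertion (after equal elements): the specification of Source B's _insert_sorted
def insSorted (v : Int) : List Int → List Int
  | [] => [v]
  | x :: t => if x ≤ v then x :: insSorted v t else v :: x :: t

theorem insSorted_perm (v : Int) (xs : List Int) : (insSorted v xs).Perm (v :: xs) := by
  induction xs with
  | nil => simp [insSorted]
  | cons x t ih =>
    simp only [insSorted]
    split
    · exact (ih.cons x).trans (List.Perm.swap v x t)
    · exact List.Perm.refl _

theorem insSorted_pairwise (v : Int) (xs : List Int) (h : xs.Pairwise (· ≤ ·)) :
    (insSorted v xs).Pairwise (· ≤ ·) := by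
  induction xs with
  | nil => simp [insSorted]
  | cons x t ih =>
    rcases List.pairwise_cons.mp h with ⟨hx, ht⟩
    by_cases hxv : x ≤ v
    · rw [show insSorted v (x :: t) = x :: insSorted v t by simp [insSorted, hxv]]
      refine List.pairwise_cons.mpr ⟨?_, ih ht⟩
      intro y hy
      rcases List.mem_cons.mp ((insSorted_perm v t).mem_iff.mp hy) with rfl | h1
      · exact hxv
      · exact hx y h1
    · rw [show insSorted v (x :: t) = v :: x :: t by simp [insSorted, hxv]]
      refine List.pairwise_cons.mpr ⟨?_, h⟩
      intro y hy
      rcases List.mem_cons.mp hy with rfl | h1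
      · omega
      · exact le_trans (by omega) (hx y h1)

theorem length_insSorted (v : Int) (xs : List Int) :
    (insSorted v xs).length = xs.length + 1 :=
  (insSorted_perm v xs).length_eq.trans (by simp)

theorem insSorted_split (v : Int) (xs : List Int) :
    insSorted v xs
      = xs.takeWhile (fun x => decide (x ≤ v)) ++ v :: xs.dropWhile (fun x => decide (x ≤ v)) := by
  induction xs with
  | nil => simp [insSorted]
  | cons x t ih =>
    by_cases hxv : x ≤ v
    · simp [insSorted, hxv, ih]
    · simp [insSorted, hxv]

-- on a sorted list, position i holds a value ≤ v exactly when i is below the ≤-v prefix length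
theorem sorted_prefix_charac (xs : List Int) (v : Int) (hs : xs.Pairwise (· ≤ ·))
    (i : Int) (h0 : 0 ≤ i) (hlen : i < (xs.length : Int)) :
    (i < ((xs.takeWhile (fun x => decide (x ≤ v))).length : Int)
      ↔ PySem.List.pyGetD xs i 0 ≤ v) := by
  have hsplit : xs.takeWhile (fun x => decide (x ≤ v)) ++ xs.dropWhile (fun x => decide (x ≤ v))
      = xs := List.takeWhile_append_dropWhile
  have hlens := congrArg List.length hsplit
  simp only [List.length_append] at hlens
  have hi' : i.toNat < xs.length := by omega
  rw [PySem.List.pyGetD_eq_getElem xs 0 h0 hlen]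
  constructor
  · intro hlt
    have hl : i.toNat < (xs.takeWhile (fun x => decide (x ≤ v))).length := by omega
    have hx : xs[i.toNat] = (xs.takeWhile (fun x => decide (x ≤ v)))[i.toNat]'hl := by
      rw [List.getElem_of_eq hsplit.symm hi', List.getElem_append_left hl]
    have hmem := List.mem_takeWhile_imp
      (List.getElem_mem hl : (xs.takeWhile (fun x => decide (x ≤ v)))[i.toNat]'hl
        ∈ xs.takeWhile (fun x => decide (x ≤ v)))
    rw [hx]
    simpa using hmem
  · intro hle
    by_contra hnot
    have hge : (xs.takeWhile (fun x => decide (x ≤ v))).length ≤ i.toNat := by omega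
    have hdlen : i.toNat - (xs.takeWhile (fun x => decide (x ≤ v))).length
        < (xs.dropWhile (fun x => decide (x ≤ v))).length := by omega
    have hxd : xs[i.toNat] = (xs.dropWhile (fun x => decide (x ≤ v)))[i.toNat -
        (xs.takeWhile (fun x => decide (x ≤ v))).length]'hdlen := by
      rw [List.getElem_of_eq hsplit.symm hi', List.getElem_append_right hge]
    have hdne : xs.dropWhile (fun x => decide (x ≤ v)) ≠ [] := by
      intro hd
      rw [hd] at hdlen
      simp at hdlen
    have hhead := List.head_dropWhile_not (fun x => decide (x ≤ v)) hdne
    have hheadv : ¬ ((xs.dropWhile (fun x => decide (x ≤ v))).head hdne ≤ v) := by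
      simpa using hhead
    have hdsorted : (xs.dropWhile (fun x => decide (x ≤ v))).Pairwise (· ≤ ·) :=
      hs.sublist (List.dropWhile_sublist _)
    have hmono : (xs.dropWhile (fun x => decide (x ≤ v))).head hdne
        ≤ (xs.dropWhile (fun x => decide (x ≤ v)))[i.toNat -
            (xs.takeWhile (fun x => decide (x ≤ v))).length]'hdlen := by
      rw [List.head_eq_getElem]
      rcases Nat.eq_zero_or_pos (i.toNat - (xs.takeWhile (fun x => decide (x ≤ v))).length)
        with hk | hk
      · simp only [hk]
        exact le_refl _
      · exact (List.pairwise_iff_getElem.mp hdsorted) 0 _ (by omega) hdlen hk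
    rw [hxd] at hle
    omega

-- the binary-search loop lands on any cut point c compatible with the ≤-v/></-v split
theorem bisLoop_eq (xs : List Int) (v : Int) (c : Int)
    (hc : ∀ i : Int, 0 ≤ i → i < (xs.length : Int) → (i < c ↔ PySem.List.pyGetD xs i 0 ≤ v)) :
    ∀ (fuel : Nat) (lo hi : Int), (hi - lo).toNat ≤ fuel →
      0 ≤ lo → lo ≤ c → c ≤ hi → hi ≤ (xs.length : Int) → bisLoop xs v lo hi = c := by
  intro fuel
  induction fuel with
  | zero =>
    intro lo hi hfuel h0 h1 h2 h3
    rw [bisLoop]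
    rw [dif_neg (by omega)]
    omega
  | succ fuel ih =>
    intro lo hi hfuel h0 h1 h2 h3
    rw [bisLoop]
    by_cases hlh : lo < hi
    · rw [dif_pos hlh]
      have hm : PySem.Int.floordiv (lo + hi) 2 = (lo + hi) / 2 := by
        simp [PySem.Int.floordiv, Int.fdiv_eq_ediv]
      have hmid1 : lo ≤ PySem.Int.floordiv (lo + hi) 2 := by rw [hm]; omega
      have hmid2 : PySem.Int.floordiv (lo + hi) 2 < hi := by rw [hm]; omega
      by_cases hv : PySem.List.pyGetD xs (PySem.Int.floordiv (lo + hi) 2) 0 ≤ v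
      · rw [if_pos hv]
        have hcm : PySem.Int.floordiv (lo + hi) 2 < c :=
          (hc _ (by omega) (by omega)).mpr hv
        exact ih _ _ (by rw [hm] at *; omega) (by omega) (by omega) h2 h3
      · rw [if_neg hv]
        have hcm : ¬ (PySem.Int.floordiv (lo + hi) 2 < c) := fun hlt =>
          hv ((hc _ (by omega) (by omega)).mp hlt)
        exact ih _ _ (by rw [hm] at *; omega) h0 h1 (by omega) (by omega)
    · rw [dif_neg hlh]
      omega

theorem insert_at (xs : List Int) (v : Int) (c : Nat) (hc : c ≤ xs.length) :
    PySem.List.insert xs (c : Int) v = xs.take c ++ v :: xs.drop c := by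
  simp [PySem.List.insert, PySem.List.sliceIndices]
  rw [if_neg (by omega), show (min ((c : Int)) (xs.length : Int)).toNat = c from by omega]

-- Source B's binary insertion equals linear sorted insertion on a sorted list
theorem insertSorted_eq (xs : List Int) (v : Int) (hs : xs.Pairwise (· ≤ ·)) :
    insertSorted xs v = insSorted v xs := by
  obtain ⟨tW, htW⟩ : ∃ tW, tW = xs.takeWhile (fun x => decide (x ≤ v)) := ⟨_, rfl⟩
  obtain ⟨dW, hdW⟩ : ∃ dW, dW = xs.dropWhile (fun x => decide (x ≤ v)) := ⟨_, rfl⟩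
  have hx : xs = tW ++ dW := by rw [htW, hdW, List.takeWhile_append_dropWhile]
  have hlen : tW.length ≤ xs.length := by rw [hx]; simp
  have hb : bisLoop xs v 0 (xs.length : Int) = (tW.length : Int) := by
    rw [htW]
    exact bisLoop_eq xs v _ (fun i h0 hl => sorted_prefix_charac xs v hs i h0 hl)
      ((xs.length : Int) - 0).toNat 0 (xs.length : Int) le_rfl le_rfl
      (by exact_mod_cast Nat.zero_le _)
      (by exact_mod_cast List.IsPrefix.length_le (List.takeWhile_prefix _))
      le_rfl
  rw [insertSorted, hb, insert_at _ _ _ hlen, insSorted_split, ← htW, ← hdW]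
  conv_lhs => rw [hx]
  rw [List.take_left' rfl, List.drop_left' rfl]

-- a valid Python index resolves to the usual nonnegative position
theorem pyIdx?_in (n : Nat) (i : Int) (h1 : -(n : Int) ≤ i) (h2 : i < (n : Int)) :
    PySem.List.pyIdx? n i = some (if 0 ≤ i then i.toNat else n - (-i).toNat) := by
  unfold PySem.List.pyIdx?
  by_cases ha : 0 ≤ i
  · simp [ha, h2]
  · simp [ha, show -(n : Int) ≤ i from h1]

theorem pyAddAt_set (bs : List Int) (i d : Int) (j : Nat)
    (hidx : PySem.List.pyIdx? bs.length i = some j) :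
    pyAddAt bs i d = bs.set j (bs.getD j 0 + d) := by
  simp [pyAddAt, PySem.List.pySetD, PySem.List.pySet?, PySem.List.pyGetD, PySem.List.pyGet?,
        hidx, List.getD]

-- one step of A on a sorted list h :: pre ++ v :: suf, where the Python index i resolves to
-- position pre.length + 1, equals one linear re-insertion step
theorem astep (i : Int) (h : Int) (pre : List Int) (v : Int) (suf : List Int)
    (hidx : PySem.List.pyIdx? (h :: pre ++ v :: suf).length i = some (pre.length + 1))
    (hp : (h :: pre ++ v :: suf).Pairwise (· ≤ ·)) :
    PySem.List.sorted (pyAddAt (pyAddAt (h :: pre ++ v :: suf) i (-1)) 0 1) (fun x => x) false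
      = insSorted (h + 1) (insSorted (v - 1) (pre ++ suf)) := by
  have h1 : pyAddAt (h :: pre ++ v :: suf) i (-1) = h :: pre ++ (v - 1) :: suf := by
    rw [pyAddAt_set _ _ _ _ hidx]
    have hget : (h :: pre ++ v :: suf).getD (pre.length + 1) 0 = v := by
      rw [show h :: pre ++ v :: suf = (h :: pre) ++ v :: suf by simp,
          show pre.length + 1 = (h :: pre).length by simp]
      simp [List.getD]
    rw [hget]
    rw [show h :: pre ++ v :: suf = (h :: pre) ++ v :: suf by simp,
        show pre.length + 1 = (h :: pre).length by simp]
    rw [List.set_append_right _ _ (le_refl _)]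
    simp [sub_eq_add_neg]
  have hidx0 : PySem.List.pyIdx? (h :: pre ++ (v - 1) :: suf).length 0 = some 0 := by
    rw [pyIdx?_in _ _ (by simp only [List.length_cons, List.length_append]; omega)
      (by simp only [List.length_cons, List.length_append]; omega)]
    simp
  have h2 : pyAddAt (h :: pre ++ (v - 1) :: suf) 0 1 = (h + 1) :: pre ++ (v - 1) :: suf := by
    rw [pyAddAt_set _ _ _ _ hidx0]
    simp [List.getD]
  rw [h1, h2]
  have hpm : (pre ++ suf).Pairwise (· ≤ ·) := by
    have hsub : (pre ++ suf).Sublist (h :: pre ++ v :: suf) := by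
      refine List.Sublist.trans ?_ (List.sublist_cons_self _ _)
      exact List.Sublist.append_left (List.sublist_cons_self _ _) pre
    exact hp.sublist hsub
  have hperm : (insSorted (h + 1) (insSorted (v - 1) (pre ++ suf))).Perm
      ((h + 1) :: pre ++ (v - 1) :: suf) :=
    (insSorted_perm _ _).trans
      (((insSorted_perm _ _).trans List.perm_middle.symm).cons _)
  exact PySem.List.sorted_id_eq_of_perm_of_pairwise _ _ hperm
    (insSorted_pairwise _ _ (insSorted_pairwise _ _ hpm))

-- B's step on h :: pre ++ v :: suf with p = pre.length + 1 evaluates to the same re-insertion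
theorem bstep (h : Int) (pre : List Int) (v : Int) (suf : List Int)
    (hpm : (pre ++ suf).Pairwise (· ≤ ·)) :
    insertSorted
      (insertSorted
        (PySem.List.slice (h :: pre ++ v :: suf) (some 1) (some ((pre.length + 1 : Nat) : Int))
          ++ PySem.List.slice (h :: pre ++ v :: suf) (some (((pre.length + 1 : Nat) : Int) + 1)) none)
        (PySem.List.pyGetD (h :: pre ++ v :: suf) (((pre.length + 1 : Nat) : Int)) 0 - 1))
      (PySem.List.pyGetD (h :: pre ++ v :: suf) 0 0 + 1)
      = insSorted (h + 1) (insSorted (v - 1) (pre ++ suf)) := by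
  have hget0 : PySem.List.pyGetD (h :: pre ++ v :: suf) 0 0 = h :=
    PySem.List.pyGetD_zero_cons _ _ _
  have hgetp : PySem.List.pyGetD (h :: pre ++ v :: suf) (((pre.length + 1 : Nat) : Int)) 0 = v := by
    rw [PySem.List.pyGetD_natCast]
    rw [show h :: pre ++ v :: suf = (h :: pre) ++ v :: suf by simp,
        show pre.length + 1 = (h :: pre).length by simp]
    simp [List.getD]
  have hsl1 : PySem.List.slice (h :: pre ++ v :: suf) (some 1) (some ((pre.length + 1 : Nat) : Int))
      = pre := by
    rw [show (some (1 : Int)) = some ((1 : Nat) : Int) by simp, PySem.List.slice_natCast]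
    simp [List.take_left']
  have hsl2 : PySem.List.slice (h :: pre ++ v :: suf) (some (((pre.length + 1 : Nat) : Int) + 1)) none
      = suf := by
    rw [show (((pre.length + 1 : Nat) : Int) + 1) = ((pre.length + 2 : Nat) : Int) by push_cast; ring,
        PySem.List.slice_from_natCast]
    rw [show h :: pre ++ v :: suf = (h :: pre ++ [v]) ++ suf by simp,
        show pre.length + 2 = (h :: pre ++ [v]).length by simp]
    exact List.drop_left
  rw [hget0, hgetp, hsl1, hsl2]
  rw [insertSorted_eq _ _ hpm, insertSorted_eq _ _ (insSorted_pairwise _ _ hpm)]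

-- decomposition of a sorted state at position j (1 ≤ j < length)
theorem decompAt (s : List Int) (j : Nat) (hj : 1 ≤ j) (hjn : j < s.length) :
    ∃ h pre v suf, s = h :: pre ++ v :: suf ∧ pre.length = j - 1 := by
  match s, hjn with
  | x :: t, hjn =>
    have hlt : j - 1 < t.length := by simp at hjn; omega
    obtain ⟨v, suf, hvs⟩ : ∃ v suf, t.drop (j - 1) = v :: suf := by
      cases hd : t.drop (j - 1) with
      | nil =>
        have := congrArg List.length hd
        simp at this
        omega
      | cons v suf => exact ⟨v, suf, rfl⟩
    refine ⟨x, t.take (j - 1), v, suf, ?_, by rw [List.length_take]; omega⟩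
    conv_lhs => rw [← List.take_append_drop (j - 1) t, hvs]
    simp

-- invariant: the two folds agree on sorted states of fixed length n, for a fixed index i
-- resolving to position j with 1 ≤ j < n
theorem fold_eq (n : Nat) (i p : Int) (j : Nat) (hj : 1 ≤ j) (hjn : j < n)
    (hp : p = (j : Int))
    (hidx : PySem.List.pyIdx? n i = some j) (r : List Int) : ∀ (s : List Int),
    s.Pairwise (· ≤ ·) → s.length = n →
    r.foldl (fun bs _ => PySem.List.sorted (pyAddAt (pyAddAt bs i (-1)) 0 1) (fun x => x) false) s
      = r.foldl (fun xs _ =>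
          insertSorted
            (insertSorted
              (PySem.List.slice xs (some 1) (some p) ++ PySem.List.slice xs (some (p + 1)) none)
              (PySem.List.pyGetD xs p 0 - 1))
            (PySem.List.pyGetD xs 0 0 + 1)) s := by
  induction r with
  | nil => intro s _ _; rfl
  | cons a r ih =>
    intro s hsp hlen
    obtain ⟨h, pre, v, suf, rfl, hpre⟩ := decompAt s j hj (by omega)
    have hj' : pre.length + 1 = j := by omega
    have hidx' : PySem.List.pyIdx? (h :: pre ++ v :: suf).length i = some (pre.length + 1) := by
      rw [hlen, hidx, hj']
    have hpcast : p = ((pre.length + 1 : Nat) : Int) := by rw [hp, hj']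
    have hpm : (pre ++ suf).Pairwise (· ≤ ·) := by
      have hsub : (pre ++ suf).Sublist (h :: pre ++ v :: suf) := by
        refine List.Sublist.trans ?_ (List.sublist_cons_self _ _)
        exact List.Sublist.append_left (List.sublist_cons_self _ _) pre
      exact hsp.sublist hsub
    have hb := bstep h pre v suf hpm
    rw [← hpcast] at hb
    simp only [List.foldl_cons]
    rw [astep i h pre v suf hidx' hsp, ← hb]
    apply ih
    · rw [hb]
      exact insSorted_pairwise _ _ (insSorted_pairwise _ _ hpm)
    · rw [hb, length_insSorted, length_insSorted]
      simp at hlen ⊢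
      omega

theorem foldl_fixed (f : List Int → Int → List Int) (s : List Int)
    (hf : ∀ b, f s b = s) : ∀ r : List Int, r.foldl f s = s := by
  intro r
  induction r with
  | nil => rfl
  | cons a r ih => rw [List.foldl_cons, hf a, ih]

-- the equivalence on in-range L (independent of the sign of M)
theorem solution_eq_of_inrange (L M : Int) (boxs : List Int) (hne : boxs ≠ [])
    (hlo : -(boxs.length : Int) ≤ L - 1) (hhi : L - 1 < (boxs.length : Int)) :
    solution L M boxs = solution_alt L M boxs := by
  simp only [solution, solution_alt]
  have hn1 : 1 ≤ boxs.length := List.length_pos_iff.mpr hne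
  -- the resolved sorted position
  set j : Nat := if 0 ≤ L - 1 then (L - 1).toNat else boxs.length - (-(L - 1)).toNat with hjdef
  have hidx : PySem.List.pyIdx? boxs.length (L - 1) = some j :=
    pyIdx?_in _ _ hlo hhi
  have hjn : j < boxs.length := by
    rw [hjdef]; split_ifs <;> omega
  -- B's p
  set p : Int := if L - 1 ≥ 0 then L - 1 else (boxs.length : Int) + (L - 1) with hpdef
  have hp : p = (j : Int) := by
    rw [hpdef, hjdef]
    split_ifs with h0
    · omega
    · omega
  have hsp : (PySem.List.sorted boxs (fun x => x) false).Pairwise (· ≤ ·) :=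
    PySem.List.sorted_pairwise _ _
  have hsl : (PySem.List.sorted boxs (fun x => x) false).length = boxs.length :=
    PySem.List.length_sorted _ _ _
  by_cases hj0 : j = 0
  · -- the move hits slot 0 twice: A's step is the identity, B returns the spread directly
    have hp0 : p = 0 := by rw [hp, hj0]; simp
    rw [if_pos hp0]
    have hfix : ∀ b : Int,
        PySem.List.sorted
          (pyAddAt (pyAddAt (PySem.List.sorted boxs (fun x => x) false) (L - 1) (-1)) 0 1)
          (fun x => x) false
        = PySem.List.sorted boxs (fun x => x) false := by
      intro b
      obtain ⟨x, t, hxt⟩ : ∃ x t, PySem.List.sorted boxs (fun x => x) false = x :: t := by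
        match hsort : PySem.List.sorted boxs (fun x => x) false, hsl with
        | x :: t, _ => exact ⟨x, t, rfl⟩
        | [], h0 => simp at h0; omega
      have hidx' : PySem.List.pyIdx? (PySem.List.sorted boxs (fun x => x) false).length (L - 1)
          = some 0 := by rw [hsl, hidx, hj0]
      have hidx0 : ∀ y : Int, PySem.List.pyIdx? (y :: t).length (0 : Int) = some 0 := by
        intro y
        rw [pyIdx?_in _ _ (by simp only [List.length_cons]; omega)
          (by simp only [List.length_cons]; omega)]
        simp
      rw [pyAddAt_set _ _ _ _ hidx', hxt]
      simp only [List.getD, List.set_cons_zero, List.getElem?_cons_zero, Option.getD_some]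
      rw [pyAddAt_set _ _ _ _ (hidx0 _)]
      simp only [List.getD, List.set_cons_zero, List.getElem?_cons_zero, Option.getD_some]
      rw [show x + -1 + 1 = x from by ring, ← hxt]
      exact PySem.List.sorted_sorted _ _
    rw [foldl_fixed _ _ hfix]
  · have hj1 : 1 ≤ j := by omega
    have hpne : ¬ p = 0 := by rw [hp]; simp; omega
    rw [if_neg hpne]
    simp only [fold_eq boxs.length (L - 1) p j hj1 hjn hp hidx _ _ hsp hsl]

-- ===== VERDICT (by name: the statement is the Claim_ definition above) =====
theorem solution_spec : Claim_equal_solution := by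
  intro L M boxs _ hpre
  rcases hpre with ⟨hne, hrest⟩
  unfold Spec_solution
  by_cases hin : -(boxs.length : Int) ≤ L - 1 ∧ L - 1 < (boxs.length : Int)
  · exact solution_eq_of_inrange L M boxs hne hin.1 hin.2
  · -- then M ≤ 0: range(M) is empty, neither side ever indexes with L-1
    have hM : M ≤ 0 := by tauto
    simp only [solution, solution_alt]
    rw [PySem.List.pyRange_one_eq_nil (by omega)]
    simp only [List.foldl_nil]
    split <;> split <;> rfl
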